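-- pv_equiv track=rewrite | github.com/100sun/coding_practice | programmers/hash.py | spy_prod_solution
-- ===== SOURCE A (Python) =====
-- def spy_prod_solution(clothes):
--     import math
--     ct_clothes = {}
--     for clothe in clothes:
--         if clothe[1] in ct_clothes.keys():
--             ct_clothes[clothe[1]] += 1
--         else:
--             ct_clothes[clothe[1]] = 1
--     return math.prod([x + 1 for x in ct_clothes.values()]) - 1
-- ===== SOURCE B (Python) =====
-- def spy_prod_solution(clothes):
--     types = [c[1] for c in clothes]
--     prod = 1
--     while types:
--         t = types[0]
--         prod *= types.count(t) + 1
--         types = [x for x in types if x != t]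
--     return prod - 1
-- ===== Notes on version B (the rewrite author's own statement) =====
-- stated objective: alternative
-- what changed: Replaced the dict-based counting pass (hash counter, then product over its values) by a partition loop: repeatedly take the first remaining type, multiply its count+1 into a running product, and filter that type out of the list.
import Mathlib
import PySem

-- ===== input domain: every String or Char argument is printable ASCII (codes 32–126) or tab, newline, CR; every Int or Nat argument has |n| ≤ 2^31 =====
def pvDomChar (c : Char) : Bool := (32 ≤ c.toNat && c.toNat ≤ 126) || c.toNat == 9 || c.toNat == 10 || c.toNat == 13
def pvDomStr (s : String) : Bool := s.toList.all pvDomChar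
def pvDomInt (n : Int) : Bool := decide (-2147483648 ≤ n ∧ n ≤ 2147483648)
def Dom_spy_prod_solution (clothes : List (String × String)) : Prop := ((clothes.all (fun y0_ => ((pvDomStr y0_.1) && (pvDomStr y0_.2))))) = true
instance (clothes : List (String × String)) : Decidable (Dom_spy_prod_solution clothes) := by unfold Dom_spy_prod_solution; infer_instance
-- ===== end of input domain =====

-- B replaces A's dict-counting pass by a partition loop (take the first remaining type,
-- multiply its count+1 into a running product, filter that type out); same value, alternative algorithm.

-- ===== PORT A =====
def spy_prod_solution (clothes : List (String × String)) : Int :=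
  let ct_clothes : PySem.Dict String Int :=
    clothes.foldl (fun d clothe =>
      if d.contains clothe.2 then d.insert clothe.2 (d.getD clothe.2 0 + 1)
      else d.insert clothe.2 1) PySem.Dict.empty
  ((ct_clothes.values.map (fun x => x + 1)).foldl (· * ·) 1) - 1

-- ===== PORT B =====
def spyAltLoop (types : List String) (prod : Int) : Int :=
  match types with
  | [] => prod
  | t :: rest =>
      spyAltLoop ((t :: rest).filter (fun x => x ≠ t))
        (prod * (PySem.List.count (t :: rest) t + 1))
termination_by types.length
decreasing_by
  simp only [List.filter_cons, ne_eq, List.length_cons]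
  simp only [not_true, decide_false, Bool.false_eq_true, if_false]
  exact Nat.lt_succ_of_le (List.length_filter_le _ _)

def spy_prod_solution_alt (clothes : List (String × String)) : Int :=
  spyAltLoop (clothes.map (fun c => c.2)) 1 - 1

-- ===== PRECONDITION & SPEC =====
def Spec_spy_prod_solution (clothes : List (String × String)) (out : Int) : Prop := out = spy_prod_solution_alt clothes
instance (clothes : List (String × String)) (out : Int) : Decidable (Spec_spy_prod_solution clothes out) := by unfold Spec_spy_prod_solution; infer_instance

-- ===== CLAIM (what is proved, stated in full; the proofs are below) =====
def Claim_equal_spy_prod_solution : Prop := ∀ (clothes : List (String × String)), Dom_spy_prod_solution clothes → Spec_spy_prod_solution clothes (spy_prod_solution clothes)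

-- ===== LEMMAS AND PROOFS =====

-- B's partition loop computes acc times the product of (count k + 1) over the distinct types.
theorem spyAltLoop_eq (types : List String) (prod : Int) :
    spyAltLoop types prod =
      prod * ((PySem.Set.ofList types).map (fun k => ((List.count k types : Int)) + 1)).prod := by
  fun_induction spyAltLoop types prod with
  | case1 prod => simp [PySem.Set.ofList]
  | case2 prod t rest ih =>
    rw [ih]
    have hfil : (t :: rest).filter (fun x => x ≠ t) = rest.filter (fun x => x ≠ t) := by
      simp
    rw [hfil, PySem.Set.ofList_cons, List.map_cons, List.prod_cons, PySem.List.count_eq]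
    have hperm : (PySem.Set.ofList (rest.filter (fun x => x ≠ t))).Perm
        ((PySem.Set.ofList rest).discard t) := by
      rw [List.perm_ext_iff_of_nodup (PySem.Set.nodup_ofList _)
        (PySem.Set.nodup_discard _ _ (PySem.Set.nodup_ofList _))]
      intro a
      simp [PySem.Set.mem_ofList, PySem.Set.mem_discard, List.mem_filter, and_comm]
    have hcongr : ((PySem.Set.ofList rest).discard t).map
          (fun k => ((List.count k (t :: rest) : Int)) + 1)
        = ((PySem.Set.ofList rest).discard t).map
          (fun k => ((List.count k (rest.filter (fun x => x ≠ t)) : Int)) + 1) := by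
      apply List.map_congr_left
      intro a ha
      have hne : a ≠ t := ((PySem.Set.mem_discard _ _ _).mp ha).2
      rw [List.count_filter (by simp [hne])]
      simp [Ne.symm hne]
    have hp : ((PySem.Set.ofList (rest.filter (fun x => x ≠ t))).map
          (fun k => ((List.count k (rest.filter (fun x => x ≠ t)) : Int)) + 1)).prod
        = (((PySem.Set.ofList rest).discard t).map
          (fun k => ((List.count k (t :: rest) : Int)) + 1)).prod := by
      rw [hcongr]
      exact (hperm.map _).prod_eq
    rw [hp]
    ring

-- A's counting loop is the standard counter over the list of types.
theorem spy_dict_eq (clothes : List (String × String)) :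
    clothes.foldl (fun d clothe =>
      if d.contains clothe.2 then d.insert clothe.2 (d.getD clothe.2 0 + 1)
      else d.insert clothe.2 1) PySem.Dict.empty
    = PySem.Dict.counter (clothes.map (fun c => c.2)) := by
  rw [← PySem.Dict.foldl_insert_getD_add_one_eq_counter, List.foldl_map]
  congr 1
  funext d c
  by_cases h : d.contains c.2
  · simp [h]
  · rw [Bool.not_eq_true] at h
    rw [PySem.Dict.getD_of_not_contains _ _ h]
    simp [h]

-- A's result equals the distinct-type product formula.
theorem spy_A_eq (clothes : List (String × String)) :
    spy_prod_solution clothes =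
      1 * ((PySem.Set.ofList (clothes.map (fun c => c.2))).map
        (fun k => ((List.count k (clothes.map (fun c => c.2)) : Int)) + 1)).prod - 1 := by
  show ((_ : PySem.Dict String Int).values.map (fun x => x + 1)).foldl (· * ·) 1 - 1 = _
  rw [spy_dict_eq]
  rw [← List.prod_eq_foldl]
  congr 1
  simp [PySem.Dict.values, PySem.Dict.items_counter, List.map_map, Function.comp_def]

-- ===== VERDICT (by name: the statement is the Claim_ definition above) =====
theorem spy_prod_solution_spec : Claim_equal_spy_prod_solution := by
  intro clothes _
  unfold Spec_spy_prod_solution spy_prod_solution_alt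
  rw [spy_A_eq, spyAltLoop_eq]
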